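-- pv_equiv track=rewrite | github.com/Noahr8/aiclasshw | coding_hw2.py | evaluate_row
-- ===== SOURCE A (Python) =====
-- def evaluate_row(row, player):
--     EMPTY_SPACE = 0
--     score = 0
--     best_move = -1
--     consecutive = 0
--
--     # Iterate through the line to evaluate score based on patterns
--     for i in range(len(row)):
--         if row[i] == player:
--             consecutive += 1
--         else:
--             if consecutive > 0:
--                 if i < len(row) and row[i] == EMPTY_SPACE:
--                     # Adjust score based on the sequence length
--                     if consecutive >= 3:
--                         return 100, i  # Immediate win condition
--                     elif consecutive == 2:
--                         score += 20
--                         best_move = max(best_move, i, key=lambda x: abs(score))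
--                     elif consecutive == 1:
--                         score += 5
--                         best_move = max(best_move, i, key=lambda x: abs(score))
--                 consecutive = 0
--
--             if row[i] == -player:
--                 score -= 1
--
--     # Final check if the line ends with a sequence
--     if consecutive > 0 and best_move == -1:
--         best_move = len(row)
--
--     return score, best_move
-- ===== SOURCE B (Python) =====
-- def evaluate_row(row, player):
--     # Group the row into maximal runs of equal value, then score per run.
--     n = len(row)
--     runs = []  # (value, start_index, length)
--     j = 0
--     while j < n:
--         k = j
--         while k < n and row[k] == row[j]:
--             k += 1
--         runs.append((row[j], j, k - j))
--         j = k
--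
--     score = 0
--     for idx, (v, s, l) in enumerate(runs):
--         if v == player:
--             if idx + 1 < len(runs) and runs[idx + 1][0] == 0:
--                 s2 = runs[idx + 1][1]
--                 if l >= 3:
--                     return 100, s2
--                 elif l == 2:
--                     score += 20
--                 else:
--                     score += 5
--         elif v == -player:
--             score -= l
--
--     best_move = n if n > 0 and row[-1] == player else -1
--     return score, best_move
-- ===== Notes on version B (the rewrite author's own statement) =====
-- stated objective: alternative
-- what changed: Replaces the per-cell state machine (consecutive counter, early return inside the scan, no-op max-with-constant-key calls) with a run-length grouping pass: the row is split into maximal runs once, each player run is scored against the start of the next run, opponent runs subtract their length, and best_move is computed directly from the last element.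
import Mathlib
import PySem

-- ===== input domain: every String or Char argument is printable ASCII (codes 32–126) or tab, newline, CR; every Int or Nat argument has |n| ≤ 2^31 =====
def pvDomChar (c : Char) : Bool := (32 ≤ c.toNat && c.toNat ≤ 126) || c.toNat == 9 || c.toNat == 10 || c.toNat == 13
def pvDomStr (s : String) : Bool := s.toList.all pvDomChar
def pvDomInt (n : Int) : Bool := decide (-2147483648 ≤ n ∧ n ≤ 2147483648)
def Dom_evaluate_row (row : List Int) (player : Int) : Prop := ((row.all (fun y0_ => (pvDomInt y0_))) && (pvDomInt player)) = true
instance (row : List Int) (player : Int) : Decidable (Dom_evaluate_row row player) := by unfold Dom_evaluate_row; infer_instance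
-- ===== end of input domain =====

-- B re-implements A by grouping the row into maximal runs once and scoring per run
-- (lookahead at the next run's value/start) instead of A's per-cell consecutive-counter
-- state machine; same O(n) cost, different structure ("alternative").

-- ===== PORT A =====
-- the for-loop over range(len(row)) with state (score, best_move, consecutive), ported
-- as structural recursion over the cells with the index carried along
def evalA_go (player n : Int) : List Int → Int → Int → Int → Int → Int × Int
  | [], _, score, best, consec =>
      -- final check after the loop
      if consec > 0 ∧ best = -1 then (score, n) else (score, best)
  | c :: rest, i, score, best, consec =>
      if c = player then
        evalA_go player n rest (i+1) score best (consec+1)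
      else
        if consec > 0 ∧ c = 0 ∧ consec ≥ 3 then (100, i)  -- immediate win return
        else
          let score1 := if consec > 0 ∧ c = 0 then
              (if consec = 2 then score + 20 else if consec = 1 then score + 5 else score)
            else score
          -- best_move = max(best_move, i, key=lambda x: abs(score)): Python's max picks
          -- the second argument only when its key is strictly greater (here: never)
          let best1 := if consec > 0 ∧ c = 0 ∧ (consec = 2 ∨ consec = 1) then
              (if |score1| > |score1| then i else best) else best
          let score2 := if c = -player then score1 - 1 else score1
          evalA_go player n rest (i+1) score2 best1 0

def evaluate_row (row : List Int) (player : Int) : Int × Int :=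
  evalA_go player (row.length : Int) row 0 0 (-1) 0

-- ===== PORT B =====
-- runs uilder: the two nested while-loops of Source B (takeWhile/dropWhile = the inner scan)
def bRuns : List Int → Int → List (Int × Int × Int)
  | [], _ => []
  | c :: rest, j =>
      let grp := rest.takeWhile (fun x => x == c)
      (c, j, (1 + grp.length : Int)) ::
        bRuns (rest.dropWhile (fun x => x == c)) (j + 1 + (grp.length : Int))
  termination_by cells _ => cells.length
  decreasing_by
    have := List.length_dropWhile_le (fun x => x == c) rest
    simp; omega

-- the for-loop over the runs, looking ahead at the next run
def bLoop (player best : Int) : List (Int × Int × Int) → Int → Int × Int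
  | [], score => (score, best)
  | r :: rest, score =>
      if r.1 = player then
        (match rest with
         | r2 :: _ =>
            if r2.1 = 0 then
              if r.2.2 ≥ 3 then (100, r2.2.1)
              else if r.2.2 = 2 then bLoop player best rest (score + 20)
              else bLoop player best rest (score + 5)
            else bLoop player best rest score
         | [] => bLoop player best rest score)
      else if r.1 = -player then bLoop player best rest (score - r.2.2)
      else bLoop player best rest score

def evaluate_row_alt (row : List Int) (player : Int) : Int × Int :=
  let best : Int :=
    match row.getLast? with
    | some c => if c = player then (row.length : Int) else -1
    | none => -1
  bLoop player best (bRuns row 0) 0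

-- ===== PRECONDITION & SPEC =====
def Spec_evaluate_row (row : List Int) (player : Int) (out : Int × Int) : Prop := out = evaluate_row_alt row player
instance (row : List Int) (player : Int) (out : Int × Int) : Decidable (Spec_evaluate_row row player out) := by unfold Spec_evaluate_row; infer_instance

-- ===== CLAIM (what is proved, stated in full; the proofs are below) =====
def Claim_equal_evaluate_row : Prop := ∀ (row : List Int) (player : Int), Dom_evaluate_row row player → Spec_evaluate_row row player (evaluate_row row player)

-- ===== LEMMAS AND PROOFS =====

-- A's best_move value after the loop, as a function of the unprocessed suffix and the
-- pending count of player cells (consec): -1, unless the whole row ends in a player run.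
def finA (player n : Int) (cells : List Int) (consec : Int) : Int :=
  match cells.getLast? with
  | some c => if c = player then n else -1
  | none => if consec > 0 then n else -1

-- L1: a block of `l` player cells just increments consec
theorem evalA_player_run (player n : Int) (l : Nat) :
    ∀ (rest : List Int) (i score best consec : Int),
    evalA_go player n (List.replicate l player ++ rest) i score best consec
      = evalA_go player n rest (i + l) score best (consec + l) := by
  induction l with
  | zero => intro rest i score best consec; simp
  | succ m ih =>
      intro rest i score best consec
      rw [List.replicate_succ, List.cons_append]
      rw [evalA_go]
      simp only [if_pos rfl]
      rw [ih]
      congr 1 <;> push_cast <;> ring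

-- L2: a block of `m` cells of value v ≠ player, entered with consec = 0,
-- just subtracts (if v = -player) one per cell
theorem evalA_opp_run (player n v : Int) (hv : v ≠ player) (m : Nat) :
    ∀ (rest : List Int) (i score best : Int),
    evalA_go player n (List.replicate m v ++ rest) i score best 0
      = evalA_go player n rest (i + m)
          (score - (if v = -player then (m : Int) else 0)) best 0 := by
  induction m with
  | zero => intro rest i score best; simp
  | succ m ih =>
      intro rest i score best
      rw [List.replicate_succ, List.cons_append]
      rw [evalA_go]
      rw [if_neg hv]
      have h1 : ¬ ((0:Int) < 0 ∧ v = 0 ∧ (0:Int) ≥ 3) := by simp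
      rw [if_neg h1]
      simp only []
      have h2 : ¬ ((0:Int) < 0 ∧ v = 0) := by simp
      have h3 : ¬ ((0:Int) < 0 ∧ v = 0 ∧ (v = 2 ∨ v = 1)) := by simp
      rw [ih]
      by_cases hvp : v = -player
      · simp only [if_pos hvp, if_neg h2]
        congr 1 <;> push_cast <;> ring
      · simp only [if_neg hvp, if_neg h2]
        congr 1 <;> push_cast <;> ring

-- takeWhile/dropWhile over a replicate-prefix decomposition
theorem takeWhile_replicate_append (v : Int) (l : Nat) (rest : List Int)
    (h : ∀ hd, rest.head? = some hd → hd ≠ v) :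
    (List.replicate l v ++ rest).takeWhile (fun x => x == v) = List.replicate l v ∧
    (List.replicate l v ++ rest).dropWhile (fun x => x == v) = rest := by
  induction l with
  | zero =>
      simp only [List.replicate_zero, List.nil_append]
      cases rest with
      | nil => simp
      | cons c t =>
          have hc : c ≠ v := h c rfl
          constructor
          · rw [List.takeWhile_cons_of_neg] ; simp [hc]
          · rw [List.dropWhile_cons_of_neg] ; simp [hc]
  | succ m ih =>
      rw [List.replicate_succ, List.cons_append]
      constructor
      · rw [List.takeWhile_cons_of_pos (by simp)]
        rw [ih.1]
      · rw [List.dropWhile_cons_of_pos (by simp)]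
        exact ih.2

theorem bRuns_cons (v : Int) (l : Nat) (hl : 0 < l) (rest : List Int) (j : Int)
    (h : ∀ hd, rest.head? = some hd → hd ≠ v) :
    bRuns (List.replicate l v ++ rest) j
      = (v, j, (l : Int)) :: bRuns rest (j + l) := by
  obtain ⟨m, rfl⟩ : ∃ m, l = m + 1 := ⟨l - 1, by omega⟩
  rw [List.replicate_succ, List.cons_append]
  rw [bRuns]
  have hdec := takeWhile_replicate_append v m rest h
  simp only [hdec.1, hdec.2, List.length_replicate]
  have e1 : (1 + (m:Int)) = ((m+1 : Nat) : Int) := by push_cast; ring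
  have e2 : j + 1 + (m:Int) = j + ((m+1:Nat)) := by push_cast; ring
  rw [e1, e2]

-- the first element surviving dropWhile fails the predicate
theorem head?_dropWhile_ne {α : Type} (p : α → Bool) :
    ∀ (l : List α) (hd : α), (l.dropWhile p).head? = some hd → p hd = false := by
  intro l
  induction l with
  | nil => simp
  | cons a t ih =>
      intro hd h
      by_cases hp : p a
      · rw [List.dropWhile_cons_of_pos hp] at h; exact ih hd h
      · rw [List.dropWhile_cons_of_neg hp] at h
        simp only [List.head?_cons, Option.some.injEq] at h
        subst h
        simpa using hp

-- one step of A's loop on a non-player cell (best_move never moves: the max key is constant)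
-- A's score after processing one non-player cell c with pending count consec:
-- the possible bonus, then the possible opponent decrement
def bonusScore (c score consec : Int) : Int :=
  if consec > 0 ∧ c = 0 then
    (if consec = 2 then score + 20 else if consec = 1 then score + 5 else score)
  else score

def stepScore (player c score consec : Int) : Int :=
  if c = -player then bonusScore c score consec - 1 else bonusScore c score consec

-- one step of A's loop on a non-player cell (best_move never moves: the max key is constant)
theorem evalA_step (player n c : Int) (hc : c ≠ player) (rest : List Int)
    (i score best consec : Int) :
    evalA_go player n (c :: rest) i score best consec =
      if consec > 0 ∧ c = 0 ∧ consec ≥ 3 then (100, i)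
      else evalA_go player n rest (i+1) (stepScore player c score consec) best 0 := by
  rw [evalA_go, if_neg hc]
  by_cases h : consec > 0 ∧ c = 0 ∧ consec ≥ 3
  · rw [if_pos h, if_pos h]
  · rw [if_neg h, if_neg h]
    simp only [gt_iff_lt, lt_irrefl, if_false, ite_self]
    rfl

-- unfolding one bLoop step on a non-player run
theorem bLoop_cons_nonplayer (player best v s l : Int) (R : List (Int × Int × Int))
    (sc : Int) (hv : v ≠ player) :
    bLoop player best ((v, s, l) :: R) sc
      = bLoop player best R (sc - (if v = -player then l else 0)) := by
  cases R with
  | nil =>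
      conv_lhs => rw [bLoop]
      by_cases hvp : v = -player
      · have hneg : ¬ (-player = player) := hvp ▸ hv
        simp [bLoop, hvp, hneg]
      · simp [bLoop, hv, hvp]
  | cons r2 R' =>
      conv_lhs => rw [bLoop]
      by_cases hvp : v = -player
      · have hneg : ¬ (-player = player) := hvp ▸ hv
        simp [hvp, hneg]
      · simp [hv, hvp]

-- unfolding one bLoop step on a player run with a lookahead run present
theorem bLoop_cons_player (player best s l v2 s2 l2 : Int) (R : List (Int × Int × Int))
    (sc : Int) :
    bLoop player best ((player, s, l) :: (v2, s2, l2) :: R) sc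
      = if v2 = 0 then
          (if l ≥ 3 then (100, s2)
           else if l = 2 then bLoop player best ((v2, s2, l2) :: R) (sc + 20)
           else bLoop player best ((v2, s2, l2) :: R) (sc + 5))
        else bLoop player best ((v2, s2, l2) :: R) sc := by
  conv_lhs => rw [bLoop]
  simp

-- finA of a run-decomposed row is determined by the tail suffix and the pending run
theorem finA_decomp (player n c : Int) (hc : c ≠ player) (m l2 : Nat)
    (rest3 : List Int) (consec : Nat) :
    finA player n (List.replicate (m+1) c ++ (List.replicate l2 player ++ rest3)) consec
      = finA player n rest3 l2 := by
  unfold finA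
  cases hr : rest3.getLast? with
  | some d =>
      simp [List.getLast?_append, hr]
  | none =>
      rcases Nat.eq_zero_or_pos l2 with hl2 | hl2
      · subst hl2
        simp [List.getLast?_append, hr, List.getLast?_replicate, hc]
      · have h0 : l2 ≠ 0 := by omega
        have hcast : (0:Int) < (l2:Int) := by exact_mod_cast hl2
        simp [List.getLast?_append, hr, List.getLast?_replicate, h0, hcast]

-- B's loop on the runs of rest2 equals B's loop on a pending player run of length l2
-- followed by the runs of rest3 (with the matching start indices)
theorem bLoop_tail_eq (player n : Int) (rest2 rest3 : List Int) (l2 m : Nat) (i sc : Int)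
    (hrest2 : rest2 = List.replicate l2 player ++ rest3)
    (hhd3 : ∀ hd, rest3.head? = some hd → hd ≠ player) :
    bLoop player (finA player n rest3 l2) (bRuns rest2 (i + ((m+1:Nat):Int))) sc
      = bLoop player (finA player n rest3 l2)
          ((if (0:Int) < (l2:Int) then [(player, i + ((m+1:Nat):Int), (l2:Int))] else []) ++
            bRuns rest3 (i+1+(m:Int)+(l2:Int))) sc := by
  rcases Nat.eq_zero_or_pos l2 with hl2 | hl2
  · subst hl2
    have h23 : rest2 = rest3 := by simpa using hrest2
    subst h23
    have hz : ¬ ((0:Int) < ((0:Nat):Int)) := by simp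
    rw [if_neg hz, List.nil_append]
    congr 1
    push_cast; ring
  · have hcast : (0:Int) < (l2:Int) := by exact_mod_cast hl2
    rw [if_pos hcast, hrest2, bRuns_cons player l2 hl2 rest3 _ hhd3]
    rw [List.cons_append, List.nil_append]
    congr 2
    push_cast; ring

-- main correspondence, at a run boundary: the pending player run is consec long
theorem main_lemma (player n : Int) :
    ∀ (N : Nat) (cells : List Int), cells.length ≤ N →
    (∀ hd, cells.head? = some hd → hd ≠ player) →
    ∀ (consec : Nat) (i s score : Int),
    evalA_go player n cells i score (-1) consec
      = bLoop player (finA player n cells consec)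
          ((if (0:Int) < consec then [(player, s, (consec : Int))] else []) ++ bRuns cells i)
          score := by
  intro N
  induction N with
  | zero =>
      intro cells hlen hhd consec i s score
      have hnil : cells = [] := by
        cases cells with
        | nil => rfl
        | cons a t => simp at hlen
      subst hnil
      rcases Nat.eq_zero_or_pos consec with h0 | h0
      · subst h0; simp [evalA_go, bRuns, bLoop, finA]
      · have hc' : (0:Int) < (consec:Int) := by exact_mod_cast h0
        simp [evalA_go, bRuns, bLoop, finA, hc', h0]
  | succ N ih =>
      intro cells hlen hhd consec i s score
      cases cells with
      | nil =>
          rcases Nat.eq_zero_or_pos consec with h0 | h0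
          · subst h0; simp [evalA_go, bRuns, bLoop, finA]
          · have hc' : (0:Int) < (consec:Int) := by exact_mod_cast h0
            simp [evalA_go, bRuns, bLoop, finA, hc', h0]
      | cons c rest =>
          have hc : c ≠ player := hhd c rfl
          -- run decomposition of rest: m more copies of c, then rest2
          set m := (rest.takeWhile (fun x => x == c)).length with hm
          set rest2 := rest.dropWhile (fun x => x == c) with hr2
          have htw : rest.takeWhile (fun x => x == c) = List.replicate m c := by
            rw [hm]
            exact List.eq_replicate_of_mem
              (fun b hb => by simpa using List.mem_takeWhile_imp hb)
          have hrest : rest = List.replicate m c ++ rest2 := by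
            conv_lhs => rw [← List.takeWhile_append_dropWhile (p := fun x => x == c) (l := rest)]
            rw [htw, hr2]
          have hhd2 : ∀ hd, rest2.head? = some hd → hd ≠ c := by
            intro hd h
            have := head?_dropWhile_ne _ rest hd (hr2 ▸ h)
            simpa using this
          -- player-run decomposition of rest2: l2 player cells, then rest3
          set l2 := (rest2.takeWhile (fun x => x == player)).length with hl2def
          set rest3 := rest2.dropWhile (fun x => x == player) with hr3
          have htw2 : rest2.takeWhile (fun x => x == player) = List.replicate l2 player := by
            rw [hl2def]
            exact List.eq_replicate_of_mem
              (fun b hb => by simpa using List.mem_takeWhile_imp hb)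
          have hrest2 : rest2 = List.replicate l2 player ++ rest3 := by
            conv_lhs => rw [← List.takeWhile_append_dropWhile (p := fun x => x == player) (l := rest2)]
            rw [htw2, hr3]
          have hhd3 : ∀ hd, rest3.head? = some hd → hd ≠ player := by
            intro hd h
            have := head?_dropWhile_ne _ rest2 hd (hr3 ▸ h)
            simpa using this
          have hlen3 : rest3.length ≤ N := by
            have h1 : rest3.length ≤ rest2.length := hr3 ▸ List.length_dropWhile_le _ _
            have h2 : rest2.length ≤ rest.length := hr2 ▸ List.length_dropWhile_le _ _
            simp only [List.length_cons] at hlen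
            omega
          -- cells as runs
          have hcells : c :: rest = List.replicate (m+1) c ++ rest2 := by
            rw [List.replicate_succ, List.cons_append, hrest]
          -- B's runs of cells start with the c-run
          have hruns : bRuns (c :: rest) i
              = (c, i, ((m+1 : Nat) : Int)) :: bRuns rest2 (i + ((m+1 : Nat) : Int)) := by
            rw [hcells]
            exact bRuns_cons c (m+1) (Nat.succ_pos m) rest2 i hhd2
          -- fin is preserved down to rest3
          have hfin : finA player n (c :: rest) (consec:Int) = finA player n rest3 (l2:Int) := by
            rw [hcells, hrest2]
            exact finA_decomp player n c hc m l2 rest3 consec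
          -- A: one step on c, continuing with the rest of the row
          rw [evalA_step player n c hc rest i score (-1) consec, hruns, hfin]
          by_cases hwin : ((consec:Int)) > 0 ∧ c = 0 ∧ ((consec:Int)) ≥ 3
          · -- immediate win on both sides
            rw [if_pos hwin, if_pos hwin.1, List.cons_append, List.nil_append]
            rw [bLoop_cons_player]
            rw [if_pos hwin.2.1, if_pos hwin.2.2]
          · rw [if_neg hwin]
            -- A: the remaining m copies of c, then the l2 player cells, then IH at rest3
            have hLHS : evalA_go player n rest (i+1) (stepScore player c score consec) (-1) 0
                = bLoop player (finA player n rest3 (l2:Int))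
                    ((if (0:Int) < (l2:Int) then [(player, i + ((m+1:Nat):Int), (l2:Int))] else []) ++
                      bRuns rest3 (i+1+(m:Int)+(l2:Int)))
                    (stepScore player c score consec - (if c = -player then (m:Int) else 0)) := by
              rw [hrest, evalA_opp_run player n c hc m rest2 (i+1)
                    (stepScore player c score consec) (-1)]
              rw [hrest2, evalA_player_run player n l2 rest3 (i+1+(m:Int)) _ (-1) 0, zero_add]
              exact ih rest3 hlen3 hhd3 l2 (i+1+(m:Int)+(l2:Int)) (i + ((m+1:Nat):Int)) _
            rw [hLHS]
            -- B: the pending player run scores the bonus against the c-run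
            have hpend : bLoop player (finA player n rest3 (l2:Int))
                  ((if (0:Int) < (consec:Int) then [(player, s, (consec:Int))] else []) ++
                    ((c, i, ((m+1:Nat):Int)) :: bRuns rest2 (i + ((m+1:Nat):Int)))) score
                = bLoop player (finA player n rest3 (l2:Int))
                    ((c, i, ((m+1:Nat):Int)) :: bRuns rest2 (i + ((m+1:Nat):Int)))
                    (bonusScore c score consec) := by
              by_cases hcz : (0:Int) < (consec:Int)
              · rw [if_pos hcz, List.cons_append, List.nil_append, bLoop_cons_player]
                by_cases hc0 : c = 0
                · rw [if_pos hc0]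
                  have hlt3 : ¬ ((consec:Int) ≥ 3) := fun h3 => hwin ⟨hcz, hc0, h3⟩
                  rw [if_neg hlt3]
                  by_cases h2 : (consec:Int) = 2
                  · rw [if_pos h2]
                    unfold bonusScore
                    rw [if_pos ⟨hcz, hc0⟩, if_pos h2]
                  · have h1 : (consec:Int) = 1 := by omega
                    rw [if_neg h2]
                    unfold bonusScore
                    rw [if_pos ⟨hcz, hc0⟩, if_neg h2, if_pos h1]
                · rw [if_neg hc0]
                  unfold bonusScore
                  rw [if_neg (by tauto)]
              · rw [if_neg hcz, List.nil_append]
                unfold bonusScore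
                rw [if_neg (by tauto)]
            rw [hpend]
            -- B: the c-run subtracts its length if it is an opponent run
            rw [bLoop_cons_nonplayer player _ c i ((m+1:Nat):Int) _ _ hc]
            have hsc : bonusScore c score consec - (if c = -player then ((m+1:Nat):Int) else 0)
                = stepScore player c score consec - (if c = -player then (m:Int) else 0) := by
              unfold stepScore
              by_cases hcp : c = -player
              · rw [if_pos hcp, if_pos hcp, if_pos hcp]; push_cast; ring
              · rw [if_neg hcp, if_neg hcp, if_neg hcp]
            rw [hsc]
            -- B: the runs of rest2 are the pending player run plus the runs of rest3
            exact (bLoop_tail_eq player n rest2 rest3 l2 m i _ hrest2 hhd3).symm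

-- the top-level assembly: strip the leading player run of the whole row, then main_lemma
theorem evaluate_row_eq (row : List Int) (player : Int) :
    evaluate_row row player = evaluate_row_alt row player := by
  simp only [evaluate_row, evaluate_row_alt]
  set n : Int := (row.length : Int) with hn
  set l0 := (row.takeWhile (fun x => x == player)).length with hl0
  set rest := row.dropWhile (fun x => x == player) with hr
  have htw : row.takeWhile (fun x => x == player) = List.replicate l0 player := by
    rw [hl0]
    exact List.eq_replicate_of_mem (fun b hb => by simpa using List.mem_takeWhile_imp hb)
  have hrow : row = List.replicate l0 player ++ rest := by
    conv_lhs => rw [← List.takeWhile_append_dropWhile (p := fun x => x == player) (l := row)]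
    rw [htw, hr]
  have hhd : ∀ hd, rest.head? = some hd → hd ≠ player := by
    intro hd h
    have := head?_dropWhile_ne _ row hd (hr ▸ h)
    simpa using this
  have hbest : (match row.getLast? with
      | some c => if c = player then n else -1
      | none => -1) = finA player n rest (l0:Int) := by
    unfold finA
    cases hr3 : rest.getLast? with
    | some d =>
        have hrl : row.getLast? = some d := by
          rw [hrow, List.getLast?_append, hr3]; rfl
        rw [hrl]
    | none =>
        have hrn : rest = [] := by
          rwa [List.getLast?_eq_none_iff] at hr3
        rcases Nat.eq_zero_or_pos l0 with h0 | h0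
        · have hrl : row.getLast? = none := by
            rw [hrow, hrn, List.append_nil, List.getLast?_replicate]
            simp [h0]
          rw [hrl]
          have : ¬ ((0:Int) < ((l0:Nat):Int)) := by simp [h0]
          simp [h0]
        · have hrl : row.getLast? = some player := by
            rw [hrow, hrn, List.append_nil, List.getLast?_replicate]
            simp [Nat.pos_iff_ne_zero.mp h0]
          rw [hrl]
          have hcast : (0:Int) < (l0:Int) := by exact_mod_cast h0
          simp
          omega
  rw [hbest]
  have hA : evalA_go player n row 0 0 (-1) 0
      = evalA_go player n rest ((0:Int) + (l0:Int)) 0 (-1) ((0:Int) + (l0:Int)) := by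
    conv_lhs => rw [hrow]
    exact evalA_player_run player n l0 rest 0 0 (-1) 0
  rw [hA, zero_add]
  rw [main_lemma player n rest.length rest le_rfl hhd l0 ((l0:Nat):Int) 0 0]
  have hruns : bRuns row 0 = (if (0:Int) < ((l0:Nat):Int) then [(player, (0:Int), ((l0:Nat):Int))] else []) ++ bRuns rest ((l0:Nat):Int) := by
    rcases Nat.eq_zero_or_pos l0 with h0 | h0
    · have hrr : row = rest := by rw [hrow, h0]; simp
      have : ¬ ((0:Int) < ((l0:Nat):Int)) := by simp [h0]
      rw [hrr, if_neg this, List.nil_append, h0]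
      simp
    · have hcast : (0:Int) < (l0:Int) := by exact_mod_cast h0
      rw [hrow, bRuns_cons player l0 h0 rest 0 hhd, if_pos hcast]
      simp
  rw [hruns]


-- ===== VERDICT (by name: the statement is the Claim_ definition above) =====
theorem evaluate_row_spec : Claim_equal_evaluate_row := by
  intro row player _
  unfold Spec_evaluate_row
  exact evaluate_row_eq row player
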